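-- pv_equiv track=rewrite | github.com/kidonrage/FESTU_Web | PR_11/2.py | do290thExercise
-- ===== SOURCE A (Python) =====
-- def do290thExercise(inputArray):
--   result = [inputArray[0]]
--
--   for i in range(1, len(inputArray)):
--     if inputArray[i] == inputArray[i - 1]:
--       if i + 1 >= len(inputArray):
--         continue
--       elif inputArray[i] != inputArray[i + 1]:
--         continue
--       else:
--         result.append(inputArray[i])
--     else:
--       result.append(inputArray[i])
--
--   return result
-- ===== SOURCE B (Python) =====
-- def do290thExercise(inputArray):
--     # Run-based rewrite: walk maximal runs of equal elements; a run of length c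
--     # contributes c-1 copies (or 1 copy if c == 1).  Returns [] on empty input
--     # where the original raises IndexError (excluded by Pre_).
--     result = []
--     i, n = 0, len(inputArray)
--     while i < n:
--         j = i
--         while j < n and inputArray[j] == inputArray[i]:
--             j += 1
--         c = j - i
--         result.extend([inputArray[i]] * (c - 1 if c > 1 else 1))
--         i = j
--     return result
-- ===== Notes on version B (the rewrite author's own statement) =====
-- stated objective: alternative
-- what changed: Replaces A's element-by-element loop with a three-way lookahead test by a run-length pass that scans each maximal run of equal elements once and emits c-1 copies for a run of length c>=2 and 1 copy for a singleton.
import Mathlib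
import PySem

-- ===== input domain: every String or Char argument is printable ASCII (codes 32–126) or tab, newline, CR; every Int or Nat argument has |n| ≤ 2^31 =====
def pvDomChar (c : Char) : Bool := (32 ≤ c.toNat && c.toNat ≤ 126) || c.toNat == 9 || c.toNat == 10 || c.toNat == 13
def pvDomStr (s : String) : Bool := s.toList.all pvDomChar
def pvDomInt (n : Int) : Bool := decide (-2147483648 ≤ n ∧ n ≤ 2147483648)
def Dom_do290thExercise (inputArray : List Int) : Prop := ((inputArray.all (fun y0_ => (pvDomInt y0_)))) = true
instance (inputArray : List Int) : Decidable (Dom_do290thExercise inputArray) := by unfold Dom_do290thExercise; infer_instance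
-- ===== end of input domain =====

-- B replaces A's per-element lookahead loop by a run-length pass over maximal runs of
-- equal elements (same cost, different decomposition); return value only.

-- ===== PORT A =====
-- the 'for i in range(1, len(inputArray))' loop, as structural recursion on i
def aLoop (xs : List Int) (i : Nat) (result : List Int) : List Int :=
  if _h : i < xs.length then
    let xi := PySem.List.pyGetD xs (i : Int) 0
    let result' :=
      if xi = PySem.List.pyGetD xs ((i : Int) - 1) 0 then
        if xs.length ≤ i + 1 then result
        else if xi ≠ PySem.List.pyGetD xs ((i : Int) + 1) 0 then result
        else result ++ [xi]
      else result ++ [xi]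
    aLoop xs (i + 1) result'
  else result
termination_by xs.length - i

def do290thExercise (inputArray : List Int) : List Int :=
  match PySem.List.pyGet? inputArray 0 with
  | some v => aLoop inputArray 1 [v]
  | none => []   -- inputArray[0] raises IndexError on []; excluded by Pre_

-- ===== PORT B =====
-- length of the leading run of elements equal to x (the inner 'while' of Source B)
def runLen (x : Int) : List Int → Nat
  | [] => 0
  | y :: ys => if y = x then runLen x ys + 1 else 0

-- needed by the termination proof of the port below
lemma runLen_le (x : Int) : ∀ ys : List Int, runLen x ys ≤ ys.length
  | [] => by simp [runLen]
  | y :: ys => by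
      simp only [runLen]
      split <;> simp [Nat.succ_le_succ (runLen_le x ys)]

def do290thExercise_alt : List Int → List Int
  | [] => []
  | x :: rest =>
      let c := runLen x rest + 1
      List.replicate (if 1 < c then c - 1 else 1) x ++
        do290thExercise_alt (rest.drop (runLen x rest))
termination_by xs => xs.length
decreasing_by
  have := runLen_le x rest
  simp

-- ===== PRECONDITION & SPEC =====
-- Pre_ excludes only the empty list, on which A raises IndexError (inputArray[0]).
def Pre_do290thExercise (inputArray : List Int) : Prop := inputArray ≠ []
instance (inputArray : List Int) : Decidable (Pre_do290thExercise inputArray) := by unfold Pre_do290thExercise; infer_instance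
def pvWitness_do290thExercise : List Int := [1, 1, 2]

def Spec_do290thExercise (inputArray : List Int) (out : List Int) : Prop := out = do290thExercise_alt inputArray
instance (inputArray : List Int) (out : List Int) : Decidable (Spec_do290thExercise inputArray out) := by unfold Spec_do290thExercise; infer_instance

-- ===== CLAIM (what is proved, stated in full; the proofs are below) =====
def Claim_equal_do290thExercise : Prop := ∀ (inputArray : List Int), Dom_do290thExercise inputArray → Pre_do290thExercise inputArray → Spec_do290thExercise inputArray (do290thExercise inputArray)

-- ===== LEMMAS AND PROOFS =====

-- the value both programs compute on the tail: g prev rest keeps an element y equal to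
-- its predecessor only if it is followed by another copy of y
def g (prev : Int) : List Int → List Int
  | [] => []
  | y :: ys =>
      (if y = prev then
        (match ys with
         | [] => []
         | z :: _ => if y = z then [y] else [])
       else [y]) ++ g y ys

lemma drop_cons_getD (xs : List Int) (i : Nat) (h : i < xs.length) :
    xs.drop i = xs.getD i 0 :: xs.drop (i + 1) := by
  rw [List.drop_eq_getElem_cons h, List.getD_eq_getElem _ _ h]

lemma aLoop_eq (xs : List Int) : ∀ (k i : Nat), xs.length - i = k → 1 ≤ i → ∀ (acc : List Int),
    aLoop xs i acc = acc ++ g (xs.getD (i - 1) 0) (xs.drop i) := by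
  intro k
  induction k with
  | zero =>
    intro i hk h1 acc
    rw [aLoop]
    have hge : ¬ i < xs.length := by omega
    have hnil : xs.drop i = [] := List.drop_eq_nil_of_le (by omega)
    simp [hge, hnil, g]
  | succ k IH =>
    intro i hk h1 acc
    rw [aLoop]
    have hlt : i < xs.length := by omega
    simp only [hlt, dif_pos]
    have hgd : PySem.List.pyGetD xs (i : Int) 0 = xs.getD i 0 :=
      PySem.List.pyGetD_natCast ..
    have hgdm : PySem.List.pyGetD xs ((i : Int) - 1) 0 = xs.getD (i - 1) 0 := by
      rw [show ((i : Int) - 1) = ((i - 1 : Nat) : Int) from by omega, PySem.List.pyGetD_natCast]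
    have hgdp : PySem.List.pyGetD xs ((i : Int) + 1) 0 = xs.getD (i + 1) 0 := by
      rw [show ((i : Int) + 1) = ((i + 1 : Nat) : Int) from by omega, PySem.List.pyGetD_natCast]
    rw [IH (i + 1) (by omega) (by omega)]
    rw [drop_cons_getD xs i hlt]
    simp only [g, hgd, hgdm, hgdp]
    rw [show i + 1 - 1 = i from by omega]
    by_cases heq : xs.getD i 0 = xs.getD (i - 1) 0
    · simp only [heq, if_pos]
      by_cases hend : xs.length ≤ i + 1
      · have hnil : xs.drop (i + 1) = [] := List.drop_eq_nil_of_le hend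
        simp [hend, hnil]
      · have hlt2 : i + 1 < xs.length := by omega
        rw [drop_cons_getD xs (i + 1) hlt2]
        by_cases hne : xs.getD i 0 = xs.getD (i + 1) 0
        · simp only [hend, if_false, ite_not]
          split_ifs <;> simp
        · simp only [hend, if_false, ite_not]
          split_ifs <;> simp
    · simp only [List.getD_eq_getElem?_getD] at heq
      simp [heq]

lemma drop_runLen (x : Int) : ∀ rest : List Int,
    rest.drop (runLen x rest) = [] ∨
      ∃ y ys, rest.drop (runLen x rest) = y :: ys ∧ y ≠ x := by
  intro rest
  induction rest with
  | nil => left; rfl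
  | cons y ys ih =>
    by_cases h : y = x
    · simpa [runLen, h] using ih
    · right; exact ⟨y, ys, by simp [runLen, h], h⟩

lemma g_run (x : Int) : ∀ rest : List Int,
    g x rest = List.replicate (runLen x rest - 1) x ++ g x (rest.drop (runLen x rest)) := by
  intro rest
  induction rest with
  | nil => simp [g, runLen]
  | cons y ys ih =>
    by_cases h : y = x
    · subst h
      cases ys with
      | nil => simp [g, runLen]
      | cons z zs =>
        by_cases hz : z = y
        · subst hz
          have h1 : 1 ≤ runLen z (z :: zs) := by simp [runLen]
          have lhs : g z (z :: z :: zs) = z :: g z (z :: zs) := by simp [g]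
          rw [lhs, ih]
          rw [show runLen z (z :: z :: zs) = runLen z (z :: zs) + 1 from by simp [runLen]]
          have hd : List.drop (runLen z (z :: zs) + 1) (z :: z :: zs)
              = List.drop (runLen z (z :: zs)) (z :: zs) := by simp
          rw [hd, show runLen z (z :: zs) + 1 - 1 = (runLen z (z :: zs) - 1) + 1 from by omega,
            List.replicate_succ]
          simp
        · have hz' : ¬ y = z := fun hh => hz hh.symm
          simp [g, runLen, hz, hz']
    · simp [g, runLen, h]

lemma alt_eq_aux : ∀ (n : Nat) (rest : List Int), rest.length ≤ n → ∀ x,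
    do290thExercise_alt (x :: rest) = x :: g x rest := by
  intro n
  induction n with
  | zero =>
    intro rest hlen x
    have h0 : rest = [] := List.eq_nil_of_length_eq_zero (by omega)
    subst h0
    rw [do290thExercise_alt]
    simp [runLen, g, do290thExercise_alt]
  | succ n IH =>
    intro rest hlen x
    rw [do290thExercise_alt]
    have halt : do290thExercise_alt (rest.drop (runLen x rest)) = g x (rest.drop (runLen x rest)) := by
      rcases drop_runLen x rest with hnil | ⟨y, ys, heq, hne⟩
      · rw [hnil, do290thExercise_alt]; rfl
      · have hys : ys.length ≤ n := by
          have h2 : (rest.drop (runLen x rest)).length = ys.length + 1 := by rw [heq]; simp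
          have h1 : (rest.drop (runLen x rest)).length = rest.length - runLen x rest := by simp
          omega
        rw [heq, IH ys hys y]
        simp [g, hne]
    rw [halt, g_run x rest]
    by_cases hk : 1 ≤ runLen x rest
    · rw [show (if 1 < runLen x rest + 1 then runLen x rest + 1 - 1 else 1) = runLen x rest from by
        rw [if_pos (by omega)]; omega]
      rw [show x :: (List.replicate (runLen x rest - 1) x ++ g x (List.drop (runLen x rest) rest))
          = List.replicate (runLen x rest - 1 + 1) x ++ g x (List.drop (runLen x rest) rest) from by
        simp [List.replicate_succ], Nat.sub_add_cancel hk]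
    · have h0 : runLen x rest = 0 := by omega
      simp [h0]

-- ===== VERDICT (by name: the statement is the Claim_ definition above) =====
theorem do290thExercise_spec : Claim_equal_do290thExercise := by
  intro xs _ hpre
  unfold Spec_do290thExercise
  match xs, hpre with
  | x :: rest, _ =>
    show do290thExercise (x :: rest) = _
    rw [do290thExercise]
    simp only [PySem.List.pyGet?_zero_cons]
    rw [aLoop_eq (x :: rest) ((x :: rest).length - 1) 1 rfl le_rfl [x],
      alt_eq_aux rest.length rest le_rfl x]
    simp
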